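-- pv_equiv track=rewrite | github.com/Nobody-Nobody1/PythonAssembly | src/vmexecuter.py | find_matching_end
-- ===== SOURCE A (Python) =====
-- class Commands:
--     ADDITION = 'ADDITION'
--     ADDITION_REGISTER = 'ADDITION_REGISTER'
--     SUBTRACT = 'SUBTRACT'
--     SUBTRACT_REGISTER = 'SUBTRACT_REGISTER'
--     MULTIPLY = 'MULIPLY'
--     MULTIPLY_REGISTER = 'MULTIPLY_REGISTER'
--     DIVIDE = 'DIVIDE'
--     DIVIDE_REGISTER = 'DIVIDE_REGISTER'
--     COMPARE = 'COMPARE'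
--     COMPARE_REGISTER = 'COMPARE_REGISTER'
--     LOGICAL_OPERATIONS = 'LOGICAL_OPERATION'
--     STORE = 'STORE'
--     PRINT = 'PRINT'
--     COMMENT = 'COMMENT'
--     MARK = 'MARK'
--     IF = 'IF'
--     WHILE = 'WHILE'
--     FOR = 'FOR'
--     LOOP_END = 'LOOP_END'
--     DECIMAL_CONVERT = 'DECIMAL_CONVERT'
--
-- def find_matching_end(bytecode, start_ip):
--     depth = 0
--     ip = start_ip
--     while ip < len(bytecode):
--         instr = bytecode[ip]
--         if not instr:
--             ip += 1
--             continue
--         name = str(instr[0]).upper()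
--         if name in (Commands.IF, Commands.WHILE, Commands.FOR):
--             depth += 1
--         elif name == Commands.LOOP_END:
--             if depth == 0:
--                 return ip
--             depth -= 1
--         ip += 1
--     return None
-- ===== SOURCE B (Python) =====
-- def find_matching_end(bytecode, start_ip):
--     # Two stages: materialise the scanned suffix as (ip, instr) pairs, then a
--     # recursive descent over that list consumes each nested block wholesale.
--     pending = [(ip, bytecode[ip]) for ip in range(start_ip, len(bytecode))]
--
--     def block_end(items):
--         # first top-level LOOP_END: return (its ip, the items after it), else None
--         while items:
--             (ip, instr), items = items[0], items[1:]
--             if not instr: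
--                 continue
--             name = str(instr[0]).upper()
--             if name == 'LOOP_END':
--                 return ip, items
--             if name in ('IF', 'WHILE', 'FOR'):
--                 inner = block_end(items)
--                 if inner is None:
--                     return None
--                 items = inner[1]
--         return None
--
--     found = block_end(pending)
--     return None if found is None else found[0]
-- ===== Notes on version B (the rewrite author's own statement) =====
-- stated objective: alternative
-- what changed: Replaces A's single flat scan with a mutable depth counter by two stages: materialise the scanned suffix as (ip, instr) pairs, then a recursive descent over that list that, at each IF/WHILE/FOR opener, recursively consumes the whole nested block and resumes on the list it returns, so no depth counter exists.
import Mathlib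
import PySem

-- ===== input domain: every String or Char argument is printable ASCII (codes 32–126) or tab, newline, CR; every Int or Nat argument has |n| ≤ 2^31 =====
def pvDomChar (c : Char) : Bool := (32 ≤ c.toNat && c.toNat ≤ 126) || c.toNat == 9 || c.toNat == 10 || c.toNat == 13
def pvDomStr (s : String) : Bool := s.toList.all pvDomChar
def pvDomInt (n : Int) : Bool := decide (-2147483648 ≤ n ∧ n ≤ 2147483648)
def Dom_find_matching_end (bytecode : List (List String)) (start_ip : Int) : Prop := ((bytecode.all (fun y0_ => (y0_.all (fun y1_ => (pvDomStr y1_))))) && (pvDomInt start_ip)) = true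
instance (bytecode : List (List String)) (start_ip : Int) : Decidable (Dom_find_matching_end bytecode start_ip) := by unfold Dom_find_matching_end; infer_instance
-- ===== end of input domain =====

-- B replaces A's flat depth-counter scan with two stages: materialise the scanned suffix as
-- (ip, instr) pairs, then a recursive descent over that list that consumes each nested block
-- wholesale and resumes on the list the recursive call returns; objective: alternative, same cost.

-- ===== PORT A =====
-- A's while-loop, one step per iteration; state = (depth, ip).  The Nat fuel only
-- makes the loop total: it counts the remaining iterations (len - ip), which the
-- loop never exceeds, so it changes nothing about the computed value.
def find_matching_end_loop (bytecode : List (List String)) : Nat → Int → Int → Option Int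
  | 0, _, _ => none
  | fuel + 1, depth, ip =>
    if ip < (bytecode.length : Int) then
      match PySem.List.pyGet? bytecode ip with
      | none => none  -- bytecode[ip] raises IndexError in Python; outside Pre_
      | some [] => find_matching_end_loop bytecode fuel depth (ip + 1)      -- `if not instr: continue`
      | some (x :: _) =>
        let name := PySem.Str.upper x                                       -- str(instr[0]).upper()
        if name = "IF" ∨ name = "WHILE" ∨ name = "FOR" then
          find_matching_end_loop bytecode fuel (depth + 1) (ip + 1)
        else if name = "LOOP_END" then
          if depth = 0 then some ip
          else find_matching_end_loop bytecode fuel (depth - 1) (ip + 1)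
        else find_matching_end_loop bytecode fuel depth (ip + 1)
    else none

def find_matching_end (bytecode : List (List String)) (start_ip : Int) : Option Int :=
  find_matching_end_loop bytecode ((bytecode.length : Int) - start_ip).toNat 0 start_ip

-- ===== PORT B =====
-- stage 1: `pending = [(ip, bytecode[ip]) for ip in range(start_ip, len(bytecode))]`.
-- Inside Pre_ every index of the range is in bounds so pyGet? is some; where it is none
-- the Python comprehension raises IndexError (outside Pre_), so the .getD [] is unreachable.
def pvPending (bytecode : List (List String)) (start_ip : Int) : List (Int × List String) :=
  (PySem.List.pyRange start_ip (bytecode.length : Int) 1).map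
    (fun ip => (ip, (PySem.List.pyGet? bytecode ip).getD []))

-- stage 2: `block_end(items)` — recursive descent over the pair list; the fuel (the list's
-- length at the top call) only makes the nested resumption total: every recursive call runs
-- on a strictly shorter list, so the fuel is never exhausted and changes no computed value.
def pvBlockEnd : Nat → List (Int × List String) → Option (Int × List (Int × List String))
  | 0, _ => none
  | _ + 1, [] => none
  | fuel + 1, (_, []) :: rest => pvBlockEnd fuel rest  -- `if not instr: continue`
  | fuel + 1, (ip, x :: _) :: rest =>
    let name := PySem.Str.upper x
    if name = "LOOP_END" then some (ip, rest)
    else if name = "IF" ∨ name = "WHILE" ∨ name = "FOR" then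
      match pvBlockEnd fuel rest with
      | none => none
      | some inner => pvBlockEnd fuel inner.2          -- resume after the nested block
    else pvBlockEnd fuel rest

def find_matching_end_alt (bytecode : List (List String)) (start_ip : Int) : Option Int :=
  let pending := pvPending bytecode start_ip
  match pvBlockEnd pending.length pending with
  | none => none
  | some found => some found.1

-- ===== PRECONDITION & SPEC =====
-- Pre_ excludes exactly start_ip < -len(bytecode), where Python's bytecode[ip] raises IndexError
-- (in both A and B; A returns normally on every other input, including negative-index wraparound).
def Pre_find_matching_end (bytecode : List (List String)) (start_ip : Int) : Prop :=
  -(bytecode.length : Int) ≤ start_ip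
instance (bytecode : List (List String)) (start_ip : Int) : Decidable (Pre_find_matching_end bytecode start_ip) := by unfold Pre_find_matching_end; infer_instance
def pvWitness_find_matching_end : List (List String) × Int := ([["IF"], ["STORE", "x"], ["LOOP_END"], ["loop_end"]], 0)

def Spec_find_matching_end (bytecode : List (List String)) (start_ip : Int) (out : Option Int) : Prop := out = find_matching_end_alt bytecode start_ip
instance (bytecode : List (List String)) (start_ip : Int) (out : Option Int) : Decidable (Spec_find_matching_end bytecode start_ip out) := by unfold Spec_find_matching_end; infer_instance

-- ===== CLAIM (what is proved, stated in full; the proofs are below) =====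
def Claim_equal_find_matching_end : Prop := ∀ (bytecode : List (List String)) (start_ip : Int), Dom_find_matching_end bytecode start_ip → Pre_find_matching_end bytecode start_ip → Spec_find_matching_end bytecode start_ip (find_matching_end bytecode start_ip)

-- ===== LEMMAS AND PROOFS =====

-- reference scan (proof device only): a direct recursive search, fuel = remaining scan length
def pvGo (bytecode : List (List String)) : Nat → Int → Option Int
  | 0, _ => none
  | fuel + 1, ip =>
    if ip < (bytecode.length : Int) then
      match PySem.List.pyGet? bytecode ip with
      | none => none
      | some [] => pvGo bytecode fuel (ip + 1)
      | some (x :: _) =>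
        let name := PySem.Str.upper x
        if name = "LOOP_END" then some ip
        else if name = "IF" ∨ name = "WHILE" ∨ name = "FOR" then
          match pvGo bytecode fuel (ip + 1) with
          | none => none
          | some e => pvGo bytecode fuel (e + 1)
        else pvGo bytecode fuel (ip + 1)
    else none

-- the reference scan started with its canonical fuel
def pvVal (bytecode : List (List String)) (ip : Int) : Option Int :=
  pvGo bytecode (((bytecode.length : Int) - ip).toNat) ip

-- any successful search result lies between the start position and the end of the list
theorem pv_go_bounds (bytecode : List (List String)) :
    ∀ (fuel : Nat) (ip e : Int), pvGo bytecode fuel ip = some e →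
      ip ≤ e ∧ e < (bytecode.length : Int) := by
  intro fuel
  induction fuel with
  | zero => intro ip e h; simp [pvGo] at h
  | succ fuel ih =>
    intro ip e h
    rw [pvGo] at h
    by_cases hip : ip < (bytecode.length : Int)
    · rw [if_pos hip] at h
      cases hg : PySem.List.pyGet? bytecode ip with
      | none => rw [hg] at h; exact absurd h (by simp)
      | some instr =>
        rw [hg] at h
        cases instr with
        | nil => have := ih (ip + 1) e h; omega
        | cons x rest =>
          simp only at h
          by_cases hend : PySem.Str.upper x = "LOOP_END"
          · rw [if_pos hend] at h
            cases h; omega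
          · rw [if_neg hend] at h
            by_cases hopen : PySem.Str.upper x = "IF" ∨ PySem.Str.upper x = "WHILE" ∨ PySem.Str.upper x = "FOR"
            · rw [if_pos hopen] at h
              cases hg1 : pvGo bytecode fuel (ip + 1) with
              | none => rw [hg1] at h; exact absurd h (by simp)
              | some e1 =>
                rw [hg1] at h
                have h1 := ih (ip + 1) e1 hg1
                have h2 := ih (e1 + 1) e h
                omega
            · rw [if_neg hopen] at h
              have := ih (ip + 1) e h; omega
    · rw [if_neg hip] at h; exact absurd h (by simp)

-- with enough fuel the reference scan computes its canonical-fuel value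
theorem pv_go_mono (bytecode : List (List String)) :
    ∀ (fuel : Nat) (ip : Int), (((bytecode.length : Int) - ip).toNat) ≤ fuel →
      pvGo bytecode fuel ip = pvVal bytecode ip := by
  intro fuel
  induction fuel using Nat.strong_induction_on with
  | _ fuel ih =>
    intro ip hf
    cases fuel with
    | zero =>
      have h0 : (((bytecode.length : Int) - ip).toNat) = 0 := by omega
      unfold pvVal
      rw [h0]
    | succ f =>
      by_cases hip : ip < (bytecode.length : Int)
      · have hk : (((bytecode.length : Int) - ip).toNat) = (((bytecode.length : Int) - (ip + 1)).toNat) + 1 := by omega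
        have hk' : (((bytecode.length : Int) - (ip + 1)).toNat) ≤ f := by omega
        unfold pvVal
        rw [hk, pvGo, pvGo, if_pos hip, if_pos hip]
        cases hg : PySem.List.pyGet? bytecode ip with
        | none => rfl
        | some instr =>
          cases instr with
          | nil => rw [ih f (by omega) (ip + 1) hk']; rfl
          | cons x rest =>
            simp only
            by_cases hend : PySem.Str.upper x = "LOOP_END"
            · rw [if_pos hend, if_pos hend]
            · rw [if_neg hend, if_neg hend]
              by_cases hopen : PySem.Str.upper x = "IF" ∨ PySem.Str.upper x = "WHILE" ∨ PySem.Str.upper x = "FOR"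
              · rw [if_pos hopen, if_pos hopen]
                rw [ih f (by omega) (ip + 1) hk']
                rw [show pvGo bytecode (((bytecode.length : Int) - (ip + 1)).toNat) (ip + 1) = pvVal bytecode (ip + 1) from rfl]
                cases hg1 : pvVal bytecode (ip + 1) with
                | none => rfl
                | some e =>
                  have hb : ip + 1 ≤ e ∧ e < (bytecode.length : Int) :=
                    pv_go_bounds bytecode _ (ip + 1) e hg1
                  simp only
                  rw [ih f (by omega) (e + 1) (by omega),
                      ih (((bytecode.length : Int) - (ip + 1)).toNat) (by omega) (e + 1) (by omega)]
              · rw [if_neg hopen, if_neg hopen, ih f (by omega) (ip + 1) hk']; rfl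
      · have h0 : (((bytecode.length : Int) - ip).toNat) = 0 := by omega
        unfold pvVal
        rw [h0]
        simp [pvGo, hip]

-- the reference scan iterated: pvNth d ip = skip d enclosing LOOP_ENDs, then search
def pvNth (bytecode : List (List String)) : Nat → Int → Option Int
  | 0, ip => pvVal bytecode ip
  | d + 1, ip =>
    match pvVal bytecode ip with
    | none => none
    | some e => pvNth bytecode d (e + 1)

theorem pvNth_succ (bytecode : List (List String)) (d : Nat) (ip : Int) :
    pvNth bytecode (d + 1) ip =
      match pvVal bytecode ip with
      | none => none
      | some e => pvNth bytecode d (e + 1) := by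
  cases hv : pvVal bytecode ip with
  | none => simp [pvNth, hv]
  | some e => simp [pvNth, hv]

theorem pvNth_none (bytecode : List (List String)) (d : Nat) (ip : Int)
    (h : pvVal bytecode ip = none) : pvNth bytecode d ip = none := by
  cases d with
  | zero => exact h
  | succ d => rw [pvNth_succ, h]

theorem pvNth_congr (bytecode : List (List String)) (d : Nat) (ip ip' : Int)
    (h : pvVal bytecode ip = pvVal bytecode ip') :
    pvNth bytecode d ip = pvNth bytecode d ip' := by
  cases d with
  | zero => exact h
  | succ d => rw [pvNth_succ, pvNth_succ, h]

theorem pvNth_open (bytecode : List (List String)) (ip : Int)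
    (h : pvVal bytecode ip =
      (pvVal bytecode (ip + 1)).bind fun e => pvVal bytecode (e + 1)) (d : Nat) :
    pvNth bytecode d ip = pvNth bytecode (d + 1) (ip + 1) := by
  cases d with
  | zero =>
    rw [pvNth_succ]
    show pvVal bytecode ip = _
    rw [h]
    cases pvVal bytecode (ip + 1) <;> simp [pvNth]
  | succ d =>
    rw [pvNth_succ, pvNth_succ]
    rw [h]
    cases hv : pvVal bytecode (ip + 1) with
    | none => simp
    | some e =>
      simp only [Option.bind_some]
      rw [pvNth_succ]

-- pvVal one-step equations at a position inside the list
theorem pvVal_step (bytecode : List (List String)) (ip : Int)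
    (hip : ip < (bytecode.length : Int)) :
    pvVal bytecode ip =
      (match PySem.List.pyGet? bytecode ip with
      | none => none
      | some [] => pvVal bytecode (ip + 1)
      | some (x :: _) =>
        if PySem.Str.upper x = "LOOP_END" then some ip
        else if PySem.Str.upper x = "IF" ∨ PySem.Str.upper x = "WHILE" ∨ PySem.Str.upper x = "FOR" then
          (pvVal bytecode (ip + 1)).bind fun e => pvVal bytecode (e + 1)
        else pvVal bytecode (ip + 1)) := by
  have hk : (((bytecode.length : Int) - ip).toNat) = (((bytecode.length : Int) - (ip + 1)).toNat) + 1 := by omega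
  unfold pvVal
  rw [hk, pvGo, if_pos hip]
  cases hg : PySem.List.pyGet? bytecode ip with
  | none => rfl
  | some instr =>
    cases instr with
    | nil => rfl
    | cons x rest =>
      simp only
      by_cases hend : PySem.Str.upper x = "LOOP_END"
      · rw [if_pos hend, if_pos hend]
      · rw [if_neg hend, if_neg hend]
        by_cases hopen : PySem.Str.upper x = "IF" ∨ PySem.Str.upper x = "WHILE" ∨ PySem.Str.upper x = "FOR"
        · rw [if_pos hopen, if_pos hopen]
          cases hg1 : pvVal bytecode (ip + 1) with
          | none =>
            rw [show pvGo bytecode (((bytecode.length : Int) - (ip+1)).toNat) (ip+1) = pvVal bytecode (ip+1) from rfl, hg1]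
            rfl
          | some e =>
            have hb : ip + 1 ≤ e ∧ e < (bytecode.length : Int) :=
              pv_go_bounds bytecode _ (ip + 1) e hg1
            rw [show pvGo bytecode (((bytecode.length : Int) - (ip+1)).toNat) (ip+1) = pvVal bytecode (ip+1) from rfl, hg1]
            simp only [Option.bind_some]
            exact pv_go_mono bytecode _ (e + 1) (by omega)
        · rw [if_neg hopen, if_neg hopen]

theorem pvVal_big (bytecode : List (List String)) (ip : Int)
    (hip : ¬ ip < (bytecode.length : Int)) : pvVal bytecode ip = none := by
  have h0 : (((bytecode.length : Int) - ip).toNat) = 0 := by omega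
  unfold pvVal
  rw [h0]
  simp [pvGo]

-- A's depth-counting loop computes the iterated reference scan
theorem pv_main (bytecode : List (List String)) :
    ∀ (fuel : Nat) (ip : Int) (d : Nat), (((bytecode.length : Int) - ip).toNat) ≤ fuel →
      find_matching_end_loop bytecode fuel (d : Int) ip = pvNth bytecode d ip := by
  intro fuel
  induction fuel with
  | zero =>
    intro ip d hf
    have hip : ¬ ip < (bytecode.length : Int) := by omega
    rw [show find_matching_end_loop bytecode 0 (d : Int) ip = none from rfl]
    exact (pvNth_none bytecode d ip (pvVal_big bytecode ip hip)).symm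
  | succ fuel ih =>
    intro ip d hf
    by_cases hip : ip < (bytecode.length : Int)
    · have hk' : (((bytecode.length : Int) - (ip + 1)).toNat) ≤ fuel := by omega
      rw [find_matching_end_loop, if_pos hip]
      cases hg : PySem.List.pyGet? bytecode ip with
      | none =>
        refine (pvNth_none bytecode d ip ?_).symm
        rw [pvVal_step bytecode ip hip, hg]
      | some instr =>
        cases instr with
        | nil =>
          have hval : pvVal bytecode ip = pvVal bytecode (ip + 1) := by
            rw [pvVal_step bytecode ip hip, hg]
          rw [ih (ip + 1) d hk', pvNth_congr bytecode d ip (ip + 1) hval]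
        | cons x rest =>
          simp only
          by_cases hopen : PySem.Str.upper x = "IF" ∨ PySem.Str.upper x = "WHILE" ∨ PySem.Str.upper x = "FOR"
          · have hend : ¬ PySem.Str.upper x = "LOOP_END" := by
              rcases hopen with h | h | h <;> simp [h]
            have hval : pvVal bytecode ip =
                (pvVal bytecode (ip + 1)).bind fun e => pvVal bytecode (e + 1) := by
              rw [pvVal_step bytecode ip hip, hg]
              simp only [hend, if_false, hopen, if_true]
            rw [if_pos hopen]
            have hcast : (d : Int) + 1 = ((d + 1 : Nat) : Int) := by push_cast; ring
            rw [hcast, ih (ip + 1) (d + 1) hk', ← pvNth_open bytecode ip hval d]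
          · rw [if_neg hopen]
            by_cases hend : PySem.Str.upper x = "LOOP_END"
            · rw [if_pos hend]
              have hval : pvVal bytecode ip = some ip := by
                rw [pvVal_step bytecode ip hip, hg]
                simp only [hend, if_true]
              cases d with
              | zero =>
                rw [show ((0 : Nat) : Int) = 0 from rfl, if_pos rfl]
                exact hval.symm
              | succ d =>
                have hdz : ¬ ((d + 1 : Nat) : Int) = 0 := by push_cast; omega
                rw [if_neg hdz]
                have hcast : ((d + 1 : Nat) : Int) - 1 = (d : Int) := by push_cast; ring
                rw [hcast, ih (ip + 1) d hk', pvNth_succ, hval]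
            · rw [if_neg hend]
              have hval : pvVal bytecode ip = pvVal bytecode (ip + 1) := by
                rw [pvVal_step bytecode ip hip, hg]
                simp only [hend, if_false, hopen, if_false]
              rw [ih (ip + 1) d hk', pvNth_congr bytecode d ip (ip + 1) hval]
    · have h1 : find_matching_end_loop bytecode (fuel + 1) (d : Int) ip = none := by
        rw [find_matching_end_loop]
        exact if_neg hip
      rw [h1]
      exact (pvNth_none bytecode d ip (pvVal_big bytecode ip hip)).symm

-- the pending list unfolds one pair per in-range position
theorem pvPending_cons (bytecode : List (List String)) (ip : Int)
    (hip : ip < (bytecode.length : Int)) :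
    pvPending bytecode ip =
      (ip, (PySem.List.pyGet? bytecode ip).getD []) :: pvPending bytecode (ip + 1) := by
  unfold pvPending
  rw [PySem.List.pyRange_one_cons hip]
  rfl

theorem pvPending_nil (bytecode : List (List String)) (ip : Int)
    (hip : ¬ ip < (bytecode.length : Int)) : pvPending bytecode ip = [] := by
  unfold pvPending
  rw [PySem.List.pyRange_one_eq_nil (by omega)]
  rfl

theorem pvPending_length (bytecode : List (List String)) (ip : Int) :
    (pvPending bytecode ip).length = ((bytecode.length : Int) - ip).toNat := by
  unfold pvPending
  rw [List.length_map, PySem.List.length_pyRange_one]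

-- B's descent on the pending list computes the reference scan (and leaves the tail after the match)
theorem pv_block (bytecode : List (List String)) :
    ∀ (fuel : Nat) (ip : Int), -(bytecode.length : Int) ≤ ip →
      (((bytecode.length : Int) - ip).toNat) ≤ fuel →
      pvBlockEnd fuel (pvPending bytecode ip) =
        (pvVal bytecode ip).map (fun e => (e, pvPending bytecode (e + 1))) := by
  intro fuel
  induction fuel with
  | zero =>
    intro ip _ hf
    have hip : ¬ ip < (bytecode.length : Int) := by omega
    rw [pvVal_big bytecode ip hip]
    rfl
  | succ fuel ih =>
    intro ip hlo hf
    by_cases hip : ip < (bytecode.length : Int)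
    · have hk' : (((bytecode.length : Int) - (ip + 1)).toNat) ≤ fuel := by omega
      have hlo' : -(bytecode.length : Int) ≤ ip + 1 := by omega
      rw [pvPending_cons bytecode ip hip, pvVal_step bytecode ip hip]
      cases hg : PySem.List.pyGet? bytecode ip with
      | none =>
        exfalso
        rw [PySem.List.pyGet?_eq_none_iff] at hg
        exact hg (by simp [PySem.Raise.InRange]; omega)
      | some instr =>
        cases instr with
        | nil =>
          simp only [Option.getD_some]
          rw [pvBlockEnd]
          exact ih (ip + 1) hlo' hk'
        | cons x rest =>
          simp only [Option.getD_some]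
          rw [pvBlockEnd]
          by_cases hend : PySem.Str.upper x = "LOOP_END"
          · rw [if_pos hend, if_pos hend]
            rfl
          · rw [if_neg hend, if_neg hend]
            by_cases hopen : PySem.Str.upper x = "IF" ∨ PySem.Str.upper x = "WHILE" ∨ PySem.Str.upper x = "FOR"
            · rw [if_pos hopen, if_pos hopen]
              rw [ih (ip + 1) hlo' hk']
              cases hv : pvVal bytecode (ip + 1) with
              | none => rfl
              | some e =>
                have hb : ip + 1 ≤ e ∧ e < (bytecode.length : Int) :=
                  pv_go_bounds bytecode _ (ip + 1) e hv
                simp only [Option.map_some, Option.bind_some]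
                exact ih (e + 1) (by omega) (by omega)
            · rw [if_neg hopen, if_neg hopen]
              exact ih (ip + 1) hlo' hk'
    · rw [pvPending_nil bytecode ip hip, pvVal_big bytecode ip hip]
      cases fuel <;> rfl

-- ===== VERDICT (by name: the statement is the Claim_ definition above) =====
theorem find_matching_end_spec : Claim_equal_find_matching_end := by
  intro bytecode start_ip _ hpre
  show find_matching_end bytecode start_ip = find_matching_end_alt bytecode start_ip
  have hA := pv_main bytecode (((bytecode.length : Int) - start_ip).toNat) start_ip 0 le_rfl
  simp only [Nat.cast_zero] at hA
  have hB := pv_block bytecode (((bytecode.length : Int) - start_ip).toNat) start_ip hpre le_rfl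
  rw [find_matching_end, find_matching_end_alt]
  simp only [pvPending_length]
  rw [hA, hB]
  show pvVal bytecode start_ip = _
  cases pvVal bytecode start_ip <;> rfl
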